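-- pv_equiv track=rewrite | github.com/creepcomp/google-foobar | level2/lovely-lucky-lambs/solution.py | generous
-- ===== SOURCE A (Python) =====
-- def generous(total_lambs):
--     generous_list = []
--     x, total = 0, 0
--     while x <= total_lambs:
--         current = 2 ** x
--         generous_list.append(current)
--         total += current
--         if total > total_lambs:
--             break
--         x += 1
--     return len(generous_list)
-- ===== SOURCE B (Python) =====
-- def generous(total_lambs):
--     # smallest n with 2^n - 1 > total_lambs, i.e. bit length of total_lambs + 1 (clamped at 0)
--     return max(total_lambs + 1, 0).bit_length()
-- ===== Notes on version B (the rewrite author's own statement) =====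
-- stated objective: simpler
-- what changed: Replaced the doubling while-loop with the closed form max(total_lambs+1,0).bit_length(), since the loop returns the smallest n with 2^n exceeding total_lambs+1.
import Mathlib
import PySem

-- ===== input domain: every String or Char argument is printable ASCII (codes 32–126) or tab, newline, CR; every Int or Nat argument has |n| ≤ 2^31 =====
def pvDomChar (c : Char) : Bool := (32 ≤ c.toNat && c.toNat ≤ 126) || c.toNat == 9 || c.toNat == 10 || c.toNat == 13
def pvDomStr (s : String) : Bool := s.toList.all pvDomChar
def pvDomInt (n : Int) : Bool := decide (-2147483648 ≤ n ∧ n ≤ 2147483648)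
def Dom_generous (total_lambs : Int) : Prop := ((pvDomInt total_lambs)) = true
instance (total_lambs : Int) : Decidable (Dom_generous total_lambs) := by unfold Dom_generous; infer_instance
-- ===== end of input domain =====

-- B replaces A's doubling while-loop by the closed form bit_length(max(total_lambs+1,0)); objective: simpler.


-- ===== PORT A =====
-- the while loop: state is x, total, and the length of generous_list (only len is returned).
-- x starts at 0 and only increments, so it stays ≥ 0; 2 ** x is ported as 2 ^ x.toNat.
def generousLoop (total_lambs x total : Int) (len : Nat) : Nat :=
  if _h : x ≤ total_lambs then
    let current : Int := 2 ^ x.toNat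
    let total' := total + current
    if total' > total_lambs then len + 1
    else generousLoop total_lambs (x + 1) total' (len + 1)
  else len
termination_by (total_lambs + 1 - x).toNat
decreasing_by omega

def generous (total_lambs : Int) : Int :=
  (generousLoop total_lambs 0 0 0 : Nat)

-- ===== PORT B =====
-- Python's int.bit_length() on a nonnegative integer is Nat.size.
def generous_alt (total_lambs : Int) : Int :=
  ((max (total_lambs + 1) 0).toNat.size : Nat)

-- ===== PRECONDITION & SPEC =====
def Spec_generous (total_lambs : Int) (out : Int) : Prop := out = generous_alt total_lambs
instance (total_lambs : Int) (out : Int) : Decidable (Spec_generous total_lambs out) := by unfold Spec_generous; infer_instance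

-- ===== CLAIM (what is proved, stated in full; the proofs are below) =====
def Claim_equal_generous : Prop := ∀ (total_lambs : Int), Dom_generous total_lambs → Spec_generous total_lambs (generous total_lambs)

-- ===== LEMMAS AND PROOFS =====

-- Loop invariant: at the top of the iteration with counter x (a natural number),
-- total = 2^x - 1 ≤ total_lambs, and the list so far has x elements; the loop returns
-- the bit length (Nat.size) of total_lambs + 1.
theorem generousLoop_inv (tl : Int) (x : Nat)
    (hle : (2 : Int) ^ x - 1 ≤ tl) :
    generousLoop tl (x : Int) ((2 : Int) ^ x - 1) x = Nat.size (tl + 1).toNat := by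
  induction hn : (tl + 1 - (x : Int)).toNat using Nat.strong_induction_on generalizing x with
  | _ n ih =>
    have hx2 : (x : Int) ≤ 2 ^ x - 1 := by
      have := Nat.lt_two_pow_self (n := x)
      have : (x : Int) < 2 ^ x := by exact_mod_cast this
      omega
    have hguard : (x : Int) ≤ tl := le_trans hx2 hle
    rw [generousLoop]
    simp only [hguard, dif_pos, Int.toNat_natCast]
    have hpow : (2 : Int) ^ x - 1 + 2 ^ x = 2 ^ (x + 1) - 1 := by ring
    by_cases hbr : (2 : Int) ^ x - 1 + 2 ^ x > tl
    · simp only [hbr, if_pos]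
      -- 2^x ≤ tl+1 < 2^(x+1): size (tl+1).toNat = x+1
      have h1 : (2 : Int) ^ x ≤ tl + 1 := by omega
      have h2 : tl + 1 < 2 ^ (x + 1) := by rw [hpow] at hbr; omega
      have h1n : 2 ^ x ≤ (tl + 1).toNat := by
        have : ((2 ^ x : Nat) : Int) ≤ tl + 1 := by push_cast; exact h1
        omega
      have h2n : (tl + 1).toNat < 2 ^ (x + 1) := by
        have : (tl + 1 : Int) < ((2 ^ (x + 1) : Nat) : Int) := by push_cast; exact h2
        omega
      have hs1 : x < Nat.size (tl + 1).toNat := Nat.lt_size.mpr h1n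
      have hs2 : Nat.size (tl + 1).toNat ≤ x + 1 := Nat.size_le.mpr h2n
      omega
    · simp only [hbr, if_neg, not_false_iff]
      have hle' : (2 : Int) ^ (x + 1) - 1 ≤ tl := by rw [← hpow]; omega
      have hcast : ((x : Int) + 1) = ((x + 1 : Nat) : Int) := by push_cast; ring
      have := ih (tl + 1 - ((x + 1 : Nat) : Int)).toNat (by omega) (x + 1) hle' rfl
      rw [hpow, hcast]
      simpa using this

theorem generous_eq (tl : Int) : generous tl = generous_alt tl := by
  unfold generous generous_alt
  by_cases h : 0 ≤ tl
  · have := generousLoop_inv tl 0 (by simpa using h)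
    simp only [Nat.cast_zero, pow_zero] at this
    norm_num at this
    rw [this]
    congr 1
    have : max (tl + 1) 0 = tl + 1 := by omega
    rw [this]
  · rw [generousLoop]
    have hneg : ¬ ((0 : Int) ≤ tl) := h
    simp only [hneg, dif_neg, not_false_iff]
    have : (max (tl + 1) 0).toNat = 0 := by omega
    simp [this, Nat.size_zero]

-- ===== VERDICT (by name: the statement is the Claim_ definition above) =====
theorem generous_spec : Claim_equal_generous := by
  intro tl _
  exact generous_eq tl
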